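-- pv_equiv track=rewrite | github.com/saptadi73/Middleware-PLC-SCADA-Odoo | test_equipment_failure_write.py | encode_bcd
-- ===== SOURCE A (Python) =====
-- def encode_bcd(value: str) -> int:
--     number = int(value)
--     if number < 0 or number > 9999:
--         raise ValueError(f"BCD out of range (0-9999): {number}")
--     digits = f"{number:04d}"
--     bcd = 0
--     for i, digit in enumerate(digits):
--         bcd = (bcd << 4) | int(digit)
--     return bcd
-- ===== SOURCE B (Python) =====
-- def encode_bcd(value: str) -> int:
--     number = int(value)
--     if number < 0 or number > 9999:
--         raise ValueError(f"BCD out of range (0-9999): {number}")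
--     return ((number // 1000) << 12) | ((number // 100 % 10) << 8) | ((number // 10 % 10) << 4) | (number % 10)
-- ===== Notes on version B (the rewrite author's own statement) =====
-- stated objective: simpler
-- what changed: Replaces the 04d string formatting and the shift-or loop over characters with a closed-form arithmetic packing of the four decimal digits.
import Mathlib
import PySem

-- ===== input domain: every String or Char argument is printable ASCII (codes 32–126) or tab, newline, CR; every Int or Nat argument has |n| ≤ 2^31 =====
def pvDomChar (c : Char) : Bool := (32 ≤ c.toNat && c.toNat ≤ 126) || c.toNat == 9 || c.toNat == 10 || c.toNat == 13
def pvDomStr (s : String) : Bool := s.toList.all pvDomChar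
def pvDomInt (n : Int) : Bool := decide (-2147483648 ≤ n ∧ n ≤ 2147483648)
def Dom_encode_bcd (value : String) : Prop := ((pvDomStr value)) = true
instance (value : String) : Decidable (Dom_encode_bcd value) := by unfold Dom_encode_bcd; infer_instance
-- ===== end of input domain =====

-- B replaces A's 04d string formatting and shift-or loop over characters with a closed-form arithmetic packing of the four decimal digits (simpler).


-- ===== PORT A =====
-- loop body: bcd = (bcd << 4) | int(digit)   (int(digit) = PySem.Int.ofChars? on the one char)
def stepA (bcd : Int) (digit : Char) : Int :=
  PySem.Int.bor (bcd <<< (4 : Nat)) ((PySem.Int.ofChars? [digit]).getD 0)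

-- digits = f"{number:04d}" then the for-loop.  The 04d format for 0 ≤ number (guaranteed by
-- the range check) is str(number) left-padded with '0' to width 4; ported by hand here.
def bcdLoopA (number : Int) : Int :=
  let digits : List Char :=
    List.replicate (4 - (PySem.Int.toChars number).length) '0' ++ PySem.Int.toChars number
  digits.foldl stepA 0

def encode_bcd (value : String) : Int :=
  match PySem.Int.ofStr? value with
  | none => 0          -- int(value) raises ValueError: excluded by Pre_
  | some number =>
    if number < 0 ∨ number > 9999 then 0   -- explicit raise ValueError: excluded by Pre_
    else bcdLoopA number

-- ===== PORT B =====
def encode_bcd_alt (value : String) : Int :=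
  match PySem.Int.ofStr? value with
  | none => 0          -- int(value) raises ValueError: excluded by Pre_
  | some number =>
    if number < 0 ∨ number > 9999 then 0   -- explicit raise ValueError: excluded by Pre_
    else
      PySem.Int.bor (PySem.Int.bor (PySem.Int.bor
        ((PySem.Int.floordiv number 1000) <<< (12 : Nat))
        ((PySem.Int.mod (PySem.Int.floordiv number 100) 10) <<< (8 : Nat)))
        ((PySem.Int.mod (PySem.Int.floordiv number 10) 10) <<< (4 : Nat)))
        (PySem.Int.mod number 10)

-- ===== PRECONDITION & SPEC =====
-- Pre_ excludes exactly the inputs on which A raises: strings int() rejects (ValueError)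
-- and those parsing to a number outside 0..9999 (the explicit raise).
def Pre_encode_bcd (value : String) : Prop :=
  0 ≤ (PySem.Int.ofStr? value).getD (-1) ∧ (PySem.Int.ofStr? value).getD (-1) ≤ 9999
instance (value : String) : Decidable (Pre_encode_bcd value) := by unfold Pre_encode_bcd; infer_instance
def pvWitness_encode_bcd : String := " 1234 "
def Spec_encode_bcd (value : String) (out : Int) : Prop := out = encode_bcd_alt value
instance (value : String) (out : Int) : Decidable (Spec_encode_bcd value out) := by unfold Spec_encode_bcd; infer_instance

-- ===== CLAIM (what is proved, stated in full; the proofs are below) =====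
def Claim_equal_encode_bcd : Prop := ∀ (value : String), Dom_encode_bcd value → Pre_encode_bcd value → Spec_encode_bcd value (encode_bcd value)

-- ===== LEMMAS AND PROOFS =====

-- BCD value of a natural number, most-significant digit first (proof-only helper).
def natBCD (n : Nat) : Nat :=
  if n < 10 then n else 16 * natBCD (n / 10) + n % 10
decreasing_by exact Nat.div_lt_self (by omega) (by omega)

-- number of decimal digits (proof-only helper).
def numD (n : Nat) : Nat :=
  if n < 10 then 1 else numD (n / 10) + 1
decreasing_by exact Nat.div_lt_self (by omega) (by omega)

theorem nat_step (a d : Nat) (hd : d < 16) : a <<< 4 ||| d = 16 * a + d := by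
  rw [← Nat.shiftLeft_add_eq_or_of_lt (show d < 2 ^ 4 by omega)]
  simp [Nat.shiftLeft_eq]; ring

theorem ofChars_digitChar (d : Nat) (hd : d < 10) :
    (PySem.Int.ofChars? [Nat.digitChar d]).getD 0 = (d : Int) := by
  interval_cases d <;> decide

theorem stepA_digitChar (a d : Nat) (hd : d < 10) :
    stepA (a : Int) (Nat.digitChar d) = ((16 * a + d : Nat) : Int) := by
  unfold stepA
  rw [ofChars_digitChar d hd,
    show ((a : Int) <<< (4 : Nat)) = ((a <<< 4 : Nat) : Int) from rfl,
    PySem.Int.bor_natCast, nat_step a d (by omega)]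

theorem foldl_toDigitsCore (f : Nat) : ∀ (n : Nat) (l : List Char) (acc : Nat), n < f →
    (Nat.toDigitsCore 10 f n l).foldl stepA (acc : Int)
      = l.foldl stepA ((acc * 16 ^ numD n + natBCD n : Nat) : Int) := by
  induction f with
  | zero => intro n l acc h; omega
  | succ f ih =>
    intro n l acc h
    by_cases hn : n < 10
    · have h0 : n / 10 = 0 := Nat.div_eq_of_lt hn
      have hmod : n % 10 = n := Nat.mod_eq_of_lt hn
      simp only [Nat.toDigitsCore, h0, if_true, List.foldl_cons]
      rw [hmod, stepA_digitChar acc n hn]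
      have hnum : numD n = 1 := by rw [numD]; rw [if_pos hn]
      have hb : natBCD n = n := by rw [natBCD]; rw [if_pos hn]
      rw [hnum, hb]
      congr 2
      omega
    · have h0 : ¬ n / 10 = 0 := by omega
      simp only [Nat.toDigitsCore, h0, if_false]
      have hlt : n / 10 < f := by
        have := Nat.div_lt_self (show 0 < n by omega) (show 1 < 10 by omega)
        omega
      rw [ih (n / 10) (Nat.digitChar (n % 10) :: l) acc hlt]
      simp only [List.foldl_cons]
      rw [stepA_digitChar _ (n % 10) (Nat.mod_lt _ (by omega))]
      have hnum : numD n = numD (n / 10) + 1 := by rw [numD]; rw [if_neg hn]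
      have hb : natBCD n = 16 * natBCD (n / 10) + n % 10 := by rw [natBCD]; rw [if_neg hn]
      rw [hnum, hb]
      congr 1
      push_cast
      ring

theorem foldl_zeros (k : Nat) : (List.replicate k '0').foldl stepA 0 = 0 := by
  induction k with
  | zero => rfl
  | succ k ih => simpa [List.replicate_succ, List.foldl_cons] using ih

theorem bcdLoopA_natCast (m : Nat) : bcdLoopA (m : Int) = (natBCD m : Int) := by
  unfold bcdLoopA
  have htc : PySem.Int.toChars (m : Int) = Nat.toDigits 10 m := by
    simp [PySem.Int.toChars]
  rw [htc]
  rw [List.foldl_append, foldl_zeros]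
  show (Nat.toDigitsCore 10 (m + 1) m []).foldl stepA ((0 : Nat) : Int) = _
  rw [foldl_toDigitsCore (m + 1) m [] 0 (by omega)]
  simp

theorem natBCD_eq (m : Nat) (h : m < 10000) :
    natBCD m = 4096 * (m / 1000) + 256 * (m / 100 % 10) + 16 * (m / 10 % 10) + m % 10 := by
  by_cases h1 : m < 10
  · rw [natBCD, if_pos h1]; omega
  · by_cases h2 : m < 100
    · rw [natBCD, if_neg h1, natBCD, if_pos (by omega)]; omega
    · by_cases h3 : m < 1000
      · rw [natBCD, if_neg h1, natBCD, if_neg (by omega), natBCD, if_pos (by omega)]; omega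
      · rw [natBCD, if_neg h1, natBCD, if_neg (by omega), natBCD, if_neg (by omega),
          natBCD, if_pos (by omega)]
        omega

theorem pack_or (a b c d : Nat) (hb : b < 10) (hc : c < 10) (hd : d < 10) :
    ((a <<< 12 ||| b <<< 8) ||| c <<< 4) ||| d = 4096 * a + 256 * b + 16 * c + d := by
  rw [← Nat.shiftLeft_add_eq_or_of_lt (show b <<< 8 < 2 ^ 12 by simp [Nat.shiftLeft_eq]; omega)]
  have e1 : a <<< 12 + b <<< 8 = (a <<< 4 + b) <<< 8 := by
    simp [Nat.shiftLeft_eq]; ring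
  rw [e1, ← Nat.shiftLeft_add_eq_or_of_lt (show c <<< 4 < 2 ^ 8 by simp [Nat.shiftLeft_eq]; omega)]
  have e2 : (a <<< 4 + b) <<< 8 + c <<< 4 = ((a <<< 4 + b) <<< 4 + c) <<< 4 := by
    simp [Nat.shiftLeft_eq]; ring
  rw [e2, ← Nat.shiftLeft_add_eq_or_of_lt (show d < 2 ^ 4 by omega)]
  simp [Nat.shiftLeft_eq]; ring

-- ===== VERDICT (by name: the statement is the Claim_ definition above) =====
theorem encode_bcd_spec : Claim_equal_encode_bcd := by
  intro value _ hpre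
  unfold Spec_encode_bcd encode_bcd encode_bcd_alt
  obtain ⟨h0, h1⟩ := hpre
  cases h : PySem.Int.ofStr? value with
  | none => simp [h] at h0
  | some n =>
    rw [h] at h0 h1
    simp only [Option.getD_some] at h0 h1
    have hif : ¬ (n < 0 ∨ n > 9999) := by omega
    simp only [hif, if_false]
    obtain ⟨m, rfl⟩ : ∃ m : Nat, n = (m : Int) := ⟨n.toNat, (Int.toNat_of_nonneg h0).symm⟩
    have hm : m < 10000 := by omega
    rw [bcdLoopA_natCast, natBCD_eq m hm]
    have d1 : PySem.Int.floordiv ((m : Int)) 1000 = ((m / 1000 : Nat) : Int) := by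
      exact_mod_cast PySem.Int.floordiv_natCast m 1000
    have d2 : PySem.Int.floordiv ((m : Int)) 100 = ((m / 100 : Nat) : Int) := by
      exact_mod_cast PySem.Int.floordiv_natCast m 100
    have d3 : PySem.Int.floordiv ((m : Int)) 10 = ((m / 10 : Nat) : Int) := by
      exact_mod_cast PySem.Int.floordiv_natCast m 10
    have e1 : PySem.Int.mod (((m / 100 : Nat) : Int)) 10 = ((m / 100 % 10 : Nat) : Int) := by
      exact_mod_cast PySem.Int.mod_natCast (m / 100) 10
    have e2 : PySem.Int.mod (((m / 10 : Nat) : Int)) 10 = ((m / 10 % 10 : Nat) : Int) := by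
      exact_mod_cast PySem.Int.mod_natCast (m / 10) 10
    have e3 : PySem.Int.mod ((m : Int)) 10 = ((m % 10 : Nat) : Int) := by
      exact_mod_cast PySem.Int.mod_natCast m 10
    rw [d1, d2, d3, e1, e2, e3]
    rw [show (((m / 1000 : Nat) : Int)) <<< (12 : Nat) = (((m / 1000) <<< 12 : Nat) : Int) from rfl,
      show (((m / 100 % 10 : Nat) : Int)) <<< (8 : Nat) = (((m / 100 % 10) <<< 8 : Nat) : Int) from rfl,
      show (((m / 10 % 10 : Nat) : Int)) <<< (4 : Nat) = (((m / 10 % 10) <<< 4 : Nat) : Int) from rfl,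
      PySem.Int.bor_natCast, PySem.Int.bor_natCast, PySem.Int.bor_natCast,
      pack_or _ _ _ _ (Nat.mod_lt _ (by omega)) (Nat.mod_lt _ (by omega)) (Nat.mod_lt _ (by omega))]
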